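-- pv_equiv track=rewrite | github.com/k-e-s-h-a-v/albanero-hackweek | Day-3/Q26.py | isRepDigit
-- ===== SOURCE A (Python) =====
-- def isRepDigit(num):
--     if num<0:
--         return False
--     while num:
--         temp = num % 10
--         num = num // 10
--         if temp != num % 10 and num!=0:
--             return False
--     return True
-- ===== SOURCE B (Python) =====
-- def isRepDigit(num):
--     if num < 0:
--         return False
--     s = str(num)
--     return all(c == s[0] for c in s)
-- ===== Notes on version B (the rewrite author's own statement) =====
-- stated objective: idiomatic
-- what changed: Replaces the arithmetic digit-peeling while loop comparing consecutive digit pairs with a single conversion to the decimal string and a check that all its characters equal the first.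
import Mathlib
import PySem

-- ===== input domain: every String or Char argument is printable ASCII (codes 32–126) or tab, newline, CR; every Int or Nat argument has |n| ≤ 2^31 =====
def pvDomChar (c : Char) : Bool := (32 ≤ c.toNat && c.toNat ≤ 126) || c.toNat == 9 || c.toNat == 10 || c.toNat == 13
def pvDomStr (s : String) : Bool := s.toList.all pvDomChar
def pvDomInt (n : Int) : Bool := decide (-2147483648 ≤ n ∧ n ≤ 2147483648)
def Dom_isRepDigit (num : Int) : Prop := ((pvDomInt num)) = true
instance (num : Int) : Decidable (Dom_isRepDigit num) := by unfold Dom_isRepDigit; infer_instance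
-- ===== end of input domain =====

-- B replaces A's digit-peeling while loop with str(num) and "all characters equal the first" (idiomatic, same cost).

-- ===== PORT A =====
-- The Python `while num:` loop; it is only entered with num ≥ 0 (negatives return
-- False before the loop), so the guard `num ≤ 0` (needed for termination) agrees
-- with Python's `while num:` on every reachable state.
def pyLoopA (num : Int) : Bool :=
  if _h : num ≤ 0 then true
  else
    let temp := PySem.Int.mod num 10
    let num' := PySem.Int.floordiv num 10
    if temp ≠ PySem.Int.mod num' 10 ∧ num' ≠ 0 then false
    else pyLoopA num'
termination_by num.toNat
decreasing_by
  simp only [PySem.Int.floordiv_eq_ediv_of_pos (by norm_num : (0:Int) < 10)]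
  omega

def isRepDigit (num : Int) : Bool :=
  if num < 0 then false else pyLoopA num

-- ===== PORT B =====
-- all(c == s[0] for c in s)  (s = str(num) is never empty; [] case is unreachable)
def allEq (cs : List Char) : Bool :=
  match cs with
  | [] => true
  | c :: _ => cs.all (fun x => x == c)

def isRepDigit_alt (num : Int) : Bool :=
  if num < 0 then false
  else allEq (PySem.Int.toStr num).toList

-- ===== PRECONDITION & SPEC =====
def Spec_isRepDigit (num : Int) (out : Bool) : Prop := out = isRepDigit_alt num
instance (num : Int) (out : Bool) : Decidable (Spec_isRepDigit num out) := by unfold Spec_isRepDigit; infer_instance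

-- ===== CLAIM (what is proved, stated in full; the proofs are below) =====
def Claim_equal_isRepDigit : Prop := ∀ (num : Int), Dom_isRepDigit num → Spec_isRepDigit num (isRepDigit num)

-- ===== LEMMAS AND PROOFS =====

-- MSB-first decimal digit characters of m, by structural peeling (proof-side model of Nat.toDigits 10).
def repChars (m : Nat) : List Char :=
  if m < 10 then [Nat.digitChar m]
  else repChars (m / 10) ++ [Nat.digitChar (m % 10)]
termination_by m
decreasing_by omega

lemma core_append (f : Nat) : ∀ (n : Nat) (l : List Char),
    Nat.toDigitsCore 10 f n l = Nat.toDigitsCore 10 f n [] ++ l := by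
  induction f with
  | zero => intro n l; simp [Nat.toDigitsCore]
  | succ f ih =>
    intro n l
    simp only [Nat.toDigitsCore]
    by_cases h : n / 10 = 0
    · simp [h]
    · simp only [h]
      rw [ih (n / 10) (Nat.digitChar (n % 10) :: l), ih (n / 10) [Nat.digitChar (n % 10)]]
      simp

lemma core_eq (f : Nat) : ∀ n, n < f → Nat.toDigitsCore 10 f n [] = repChars n := by
  induction f with
  | zero => intro n h; omega
  | succ f ih =>
    intro n h
    simp only [Nat.toDigitsCore]
    by_cases h10 : n < 10
    · have hdiv : n / 10 = 0 := Nat.div_eq_of_lt h10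
      rw [repChars]
      simp [hdiv, if_pos h10, Nat.mod_eq_of_lt h10]
    · have hdiv : n / 10 ≠ 0 := by omega
      rw [if_neg hdiv, core_append, ih (n / 10) (by omega)]
      conv_rhs => rw [repChars]
      rw [if_neg h10]

lemma toDigits_eq (m : Nat) : Nat.toDigits 10 m = repChars m := by
  unfold Nat.toDigits
  exact core_eq (m + 1) m (Nat.lt_succ_self m)

lemma repChars_ne_nil (k : Nat) : repChars k ≠ [] := by
  rw [repChars]; split <;> simp

lemma mem_repChars_last (k : Nat) : Nat.digitChar (k % 10) ∈ repChars k := by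
  rw [repChars]
  split
  · next h => simp [Nat.mod_eq_of_lt h]
  · simp

lemma allEq_mem {xs : List Char} {a b : Char} (h : allEq xs = true)
    (ha : a ∈ xs) (hb : b ∈ xs) : a = b := by
  cases xs with
  | nil => simp at ha
  | cons c tl =>
    simp only [allEq, List.all_eq_true, beq_iff_eq] at h
    rw [h a ha, h b hb]

lemma digitChar_inj {a b : Nat} (ha : a < 10) (hb : b < 10) :
    Nat.digitChar a = Nat.digitChar b → a = b := by
  interval_cases a <;> interval_cases b <;> simp [Nat.digitChar]

lemma allEq_append_singleton (hd : Char) (tl : List Char) (c : Char) :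
    allEq ((hd :: tl) ++ [c]) = (allEq (hd :: tl) && (c == hd)) := by
  simp [allEq, List.all_append, Bool.and_comm]

lemma allEq_head_eq (k : Nat) (h : allEq (repChars k) = true) :
    (repChars k).head? = some (Nat.digitChar (k % 10)) := by
  cases hx : repChars k with
  | nil => exact absurd hx (repChars_ne_nil k)
  | cons hd tl =>
    have hmem : hd ∈ repChars k := by rw [hx]; simp
    have hd2 : Nat.digitChar (k % 10) ∈ repChars k := mem_repChars_last k
    rw [allEq_mem h hmem hd2]
    simp

lemma mod_cast_int (m : Nat) : PySem.Int.mod (m : Int) 10 = ((m % 10 : Nat) : Int) := by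
  exact_mod_cast PySem.Int.mod_natCast m 10

lemma floordiv_cast_int (m : Nat) : PySem.Int.floordiv (m : Int) 10 = ((m / 10 : Nat) : Int) := by
  exact_mod_cast PySem.Int.floordiv_natCast m 10

lemma key (m : Nat) : pyLoopA (m : Int) = allEq (repChars m) := by
  induction m using Nat.strong_induction_on with
  | _ m ih =>
    rw [pyLoopA]
    by_cases hm : m = 0
    · subst hm
      rw [repChars]
      simp [allEq, Nat.digitChar]
    · rw [dif_neg (by exact_mod_cast by omega : ¬ (m : Int) ≤ 0)]
      simp only [mod_cast_int, floordiv_cast_int]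
      have hcond : (((m % 10 : Nat) : Int) ≠ ((m / 10 % 10 : Nat) : Int) ∧ ((m / 10 : Nat) : Int) ≠ 0)
          ↔ (m % 10 ≠ m / 10 % 10 ∧ m / 10 ≠ 0) := by
        constructor <;> intro ⟨h1, h2⟩ <;> exact ⟨by exact_mod_cast h1, by exact_mod_cast h2⟩
      by_cases h10 : m < 10
      · have hdiv : m / 10 = 0 := Nat.div_eq_of_lt h10
        rw [if_neg]
        · rw [hdiv]
          have h0 : pyLoopA ((0 : Nat) : Int) = true := by rw [pyLoopA]; norm_num
          rw [h0, repChars, if_pos h10]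
          simp [allEq]
        · rw [hcond]; simp [hdiv]
      · have hdvd : m / 10 ≠ 0 := by omega
        rw [repChars, if_neg h10]
        by_cases heq : m % 10 = m / 10 % 10
        · rw [if_neg (by rw [hcond]; simp [heq])]
          rw [ih (m / 10) (by omega)]
          cases hx : repChars (m / 10) with
          | nil => exact absurd hx (repChars_ne_nil (m / 10))
          | cons hd tl =>
            rw [allEq_append_singleton]
            by_cases hall : allEq (hd :: tl) = true
            · have := allEq_head_eq (m / 10) (by rw [hx]; exact hall)
              rw [hx] at this
              simp only [List.head?_cons, Option.some.injEq] at this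
              rw [hall, heq, ← this]
              simp
            · simp [Bool.not_eq_true] at hall
              rw [hall]; simp
        · rw [if_pos (by rw [hcond]; exact ⟨heq, hdvd⟩)]
          by_contra hfalse
          have htrue : allEq (repChars (m / 10) ++ [Nat.digitChar (m % 10)]) = true := by
            revert hfalse; cases (allEq (repChars (m / 10) ++ [Nat.digitChar (m % 10)])) <;> simp
          have h1 : Nat.digitChar (m % 10) ∈ repChars (m / 10) ++ [Nat.digitChar (m % 10)] := by simp
          have h2 : Nat.digitChar (m / 10 % 10) ∈ repChars (m / 10) ++ [Nat.digitChar (m % 10)] :=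
            List.mem_append_left _ (mem_repChars_last (m / 10))
          exact heq (digitChar_inj (Nat.mod_lt _ (by omega)) (Nat.mod_lt _ (by omega))
            (allEq_mem htrue h1 h2))

-- ===== VERDICT (by name: the statement is the Claim_ definition above) =====
theorem isRepDigit_spec : Claim_equal_isRepDigit := by
  intro num _
  unfold Spec_isRepDigit
  by_cases hn : num < 0
  · simp [isRepDigit, isRepDigit_alt, hn]
  · rw [isRepDigit, if_neg hn, isRepDigit_alt, if_neg hn]
    rw [PySem.Int.toList_toStr, PySem.Int.toChars, if_neg hn, toDigits_eq]
    have : num = ((num.toNat : Nat) : Int) := (Int.toNat_of_nonneg (by omega)).symm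
    rw [this]
    exact key num.toNat
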